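-- pv_equiv track=rewrite | github.com/hampu5/ml-classify | ml_classify/compiledataset.py | fuzzify
-- ===== SOURCE A (Python) =====
-- def fuzzify(s):
--     s_temp = [0] * len(s) # Always 64 in this study
--     for i, b1 in enumerate(s):
--         if b1 == "1":
--             if i - 2 >= 0: s_temp[i-2] += 1
--             if i - 1 >= 0: s_temp[i-1] += 2
--             s_temp[i] += 4
--             if i + 1 < len(s): s_temp[i+1] += 2
--             if i + 2 < len(s): s_temp[i+2] += 1
--     return s_temp
-- ===== SOURCE B (Python) =====
-- def fuzzify(s):
--     n = len(s)
--     kernel = ((-2, 1), (-1, 2), (0, 4), (1, 2), (2, 1))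
--     return [sum(w for off, w in kernel if 0 <= j + off < n and s[j + off] == "1")
--             for j in range(n)]
-- ===== Notes on version B (the rewrite author's own statement) =====
-- stated objective: alternative
-- what changed: A scatters: for each '1' character it adds the weights 1,2,4,2,1 to the surrounding window of an accumulator list; B gathers: it builds each output cell directly by summing the symmetric kernel over the in-range window of input characters, with no mutable accumulator.
import Mathlib
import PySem

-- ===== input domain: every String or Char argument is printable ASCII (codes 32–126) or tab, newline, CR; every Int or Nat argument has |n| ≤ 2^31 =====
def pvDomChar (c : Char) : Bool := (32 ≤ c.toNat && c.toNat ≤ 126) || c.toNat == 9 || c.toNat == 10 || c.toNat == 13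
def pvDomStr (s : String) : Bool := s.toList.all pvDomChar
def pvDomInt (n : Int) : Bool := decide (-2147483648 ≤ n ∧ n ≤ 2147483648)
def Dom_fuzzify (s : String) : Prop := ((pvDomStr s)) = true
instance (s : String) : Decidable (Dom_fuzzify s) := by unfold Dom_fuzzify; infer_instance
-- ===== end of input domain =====

-- B replaces A's scatter (each '1' bit adds weights 1,2,4,2,1 to its window) by the dual
-- gather (each output cell sums the symmetric kernel over its input window): same values,
-- different decomposition (objective: alternative).

-- ===== PORT A =====
-- s_temp[k] += w  (k always in range when A executes it)
def pvAddAt (xs : List Int) (k : Nat) (w : Int) : List Int :=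
  xs.set k (xs.getD k 0 + w)

-- body of A's loop over `enumerate(s)`
def fuzzStep (n : Nat) (xs : List Int) (p : Int × Char) : List Int :=
  if p.2 = '1' then
    let i := p.1
    let xs := if i - 2 ≥ 0 then pvAddAt xs (i - 2).toNat 1 else xs
    let xs := if i - 1 ≥ 0 then pvAddAt xs (i - 1).toNat 2 else xs
    let xs := pvAddAt xs i.toNat 4
    let xs := if i + 1 < (n : Int) then pvAddAt xs (i + 1).toNat 2 else xs
    let xs := if i + 2 < (n : Int) then pvAddAt xs (i + 2).toNat 1 else xs
    xs
  else xs

def fuzzify (s : String) : List Int :=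
  let l := s.toList
  (PySem.List.enumerate l 0).foldl (fuzzStep l.length) (List.replicate l.length 0)

-- ===== PORT B =====
-- the symmetric weight kernel: offset ↦ weight
def fuzzKernel : List (Int × Int) := [(-2, 1), (-1, 2), (0, 4), (1, 2), (2, 1)]

def fuzzify_alt (s : String) : List Int :=
  let l := s.toList
  let n := l.length
  (List.range n).map (fun (j : Nat) =>
    fuzzKernel.foldl (fun t ow =>
      let k := (j : Int) + ow.1
      if 0 ≤ k ∧ k < (n : Int) ∧ l.getD k.toNat ' ' = '1' then t + ow.2 else t) 0)

-- ===== PRECONDITION & SPEC =====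
def Spec_fuzzify (s : String) (out : List Int) : Prop := out = fuzzify_alt s
instance (s : String) (out : List Int) : Decidable (Spec_fuzzify s out) := by unfold Spec_fuzzify; infer_instance

-- ===== CLAIM (what is proved, stated in full; the proofs are below) =====
def Claim_equal_fuzzify : Prop := ∀ (s : String), Dom_fuzzify s → Spec_fuzzify s (fuzzify s)

-- ===== LEMMAS AND PROOFS =====

-- weight that the '1' bit at index i contributes to output cell j (for j < length)
def kernAt (i j : Nat) : Int :=
  (if i = j + 2 then 1 else 0) + (if i = j + 1 then 2 else 0) + (if i = j then 4 else 0)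
  + (if 1 ≤ j ∧ i = j - 1 then 2 else 0) + (if 2 ≤ j ∧ i = j - 2 then 1 else 0)

def contrib (p : Int × Char) (j : Nat) : Int :=
  if p.2 = '1' then kernAt p.1.toNat j else 0

-- the value both programs compute at cell j
def gatherVal (l : List Char) (j : Nat) : Int :=
  (if j + 2 < l.length ∧ l.getD (j + 2) ' ' = '1' then 1 else 0)
  + (if j + 1 < l.length ∧ l.getD (j + 1) ' ' = '1' then 2 else 0)
  + (if l.getD j ' ' = '1' then 4 else 0)
  + (if 1 ≤ j ∧ l.getD (j - 1) ' ' = '1' then 2 else 0)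
  + (if 2 ≤ j ∧ l.getD (j - 2) ' ' = '1' then 1 else 0)

@[simp] theorem pvAddAt_length (xs : List Int) (k : Nat) (w : Int) :
    (pvAddAt xs k w).length = xs.length := by
  simp [pvAddAt]

theorem pvAddAt_getD (xs : List Int) (k j : Nat) (w : Int) (hj : j < xs.length) :
    (pvAddAt xs k w).getD j 0 = xs.getD j 0 + (if k = j then w else 0) := by
  simp only [pvAddAt, List.getD, List.getElem?_set]
  by_cases h : k = j
  · subst h
    simp [hj]
  · simp [h]

theorem condAdd_length (g : Prop) [Decidable g] (ys : List Int) (k : Nat) (w : Int) :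
    (if g then pvAddAt ys k w else ys).length = ys.length := by
  split_ifs <;> simp

theorem condAdd_getD (g : Prop) [Decidable g] (ys : List Int) (k j : Nat) (w : Int)
    (hj : j < ys.length) :
    (if g then pvAddAt ys k w else ys).getD j 0
      = ys.getD j 0 + (if g ∧ k = j then w else 0) := by
  split_ifs with h1 h2 h2
  · rw [pvAddAt_getD ys k j w hj]
    simp [h2.2]
  · rw [pvAddAt_getD ys k j w hj]
    have hk : ¬ k = j := fun h => h2 ⟨h1, h⟩
    simp [hk]
  · exact absurd h2.1 h1
  · simp

theorem fuzzStep_length (n : Nat) (xs : List Int) (p : Int × Char) :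
    (fuzzStep n xs p).length = xs.length := by
  unfold fuzzStep
  split_ifs <;> simp [condAdd_length]

theorem fuzzStep_getD (n : Nat) (xs : List Int) (p : Int × Char)
    (hx : xs.length = n) (hi : 0 ≤ p.1) (j : Nat) (hj : j < n) :
    (fuzzStep n xs p).getD j 0 = xs.getD j 0 + contrib p j := by
  obtain ⟨i, c⟩ := p
  simp only [contrib, kernAt, fuzzStep]
  by_cases hc : c = '1'
  · simp only [hc, if_true]
    rw [condAdd_getD _ _ _ _ _ (by simp [condAdd_length, hx, hj]),
        condAdd_getD _ _ _ _ _ (by simp [condAdd_length, hx, hj]),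
        pvAddAt_getD _ _ _ _ (by simp [condAdd_length, hx, hj]),
        condAdd_getD _ _ _ _ _ (by simp [condAdd_length, hx, hj]),
        condAdd_getD _ _ _ _ _ (by simp [hx, hj])]
    simp only [ge_iff_le]
    have e1 : ((0:Int) ≤ i - 2 ∧ (i - 2).toNat = j) ↔ (i.toNat = j + 2) := by omega
    have e2 : ((0:Int) ≤ i - 1 ∧ (i - 1).toNat = j) ↔ (i.toNat = j + 1) := by omega
    have e3 : (i.toNat = j) ↔ (i.toNat = j) := Iff.rfl
    have e4 : (i + 1 < (n:Int) ∧ (i + 1).toNat = j) ↔ (1 ≤ j ∧ i.toNat = j - 1) := by omega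
    have e5 : (i + 2 < (n:Int) ∧ (i + 2).toNat = j) ↔ (2 ≤ j ∧ i.toNat = j - 2) := by omega
    rw [if_congr e1 rfl rfl, if_congr e2 rfl rfl, if_congr e4 rfl rfl, if_congr e5 rfl rfl]
    ring
  · simp [hc]

theorem fold_getD (n : Nat) (ps : List (Int × Char)) (xs : List Int)
    (hx : xs.length = n) (hps : ∀ p ∈ ps, 0 ≤ p.1) (j : Nat) (hj : j < n) :
    (ps.foldl (fuzzStep n) xs).getD j 0
      = xs.getD j 0 + (ps.map (fun p => contrib p j)).sum := by
  induction ps generalizing xs with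
  | nil => simp
  | cons p ps ih =>
    simp only [List.foldl_cons, List.map_cons, List.sum_cons]
    rw [ih _ (by rw [fuzzStep_length]; exact hx) (fun q hq => hps q (by simp [hq])),
      fuzzStep_getD n xs p hx (hps p (by simp)) j hj]
    ring

theorem sum_map_add {α : Type} (xs : List α) (f g : α → Int) :
    (xs.map (fun x => f x + g x)).sum = (xs.map f).sum + (xs.map g).sum := by
  induction xs with
  | nil => simp
  | cons a xs ih => simp [ih]; ring

-- sum over enumerate of an indicator picking out index t
theorem sum_ind (l : List Char) (s : Int) (hs : 0 ≤ s) (t : Nat) (w : Int) :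
    ((PySem.List.enumerate l s).map
        (fun p => if p.2 = '1' ∧ p.1.toNat = t then w else 0)).sum
      = if s.toNat ≤ t ∧ t < s.toNat + l.length ∧ l.getD (t - s.toNat) ' ' = '1' then w
        else 0 := by
  induction l generalizing s with
  | nil => simp [PySem.List.enumerate]
  | cons a l ih =>
    rw [PySem.List.enumerate_cons]
    simp only [List.map_cons, List.sum_cons]
    rw [ih (s + 1) (by omega)]
    by_cases ht : s.toNat = t
    · have h0 : t - s.toNat = 0 := by omega
      have h1 : ¬((s + 1).toNat ≤ t) := by omega
      have h2 : t < s.toNat + (a :: l).length := by simp; omega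
      simp only [h1, false_and, if_false, ht, add_zero]
      by_cases ha : a = '1' <;> simp [ha]
    · rcases Nat.lt_or_ge t s.toNat with hlt | hge
      · have h1 : ¬((s + 1).toNat ≤ t) := by omega
        have h2 : ¬(s.toNat ≤ t) := by omega
        simp [h1, h2, ht]
      · have hgt : s.toNat < t := by omega
        obtain ⟨d, hd⟩ : ∃ d, t - s.toNat = d + 1 := ⟨t - s.toNat - 1, by omega⟩
        have h2 : t - (s + 1).toNat = d := by omega
        have h3 : ((s + 1).toNat ≤ t) := by omega
        have h4 : (s.toNat ≤ t) := by omega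
        have h5 : (t < (s + 1).toNat + l.length) ↔ (t < s.toNat + (a :: l).length) := by
          simp; omega
        simp only [hd, h2, h3, h4, true_and, h5, List.getD_cons_succ]
        simp [ht]

-- indicator sum with an extra side condition C on j, at start index 0
theorem sum_ind' (l : List Char) (t : Nat) (w : Int) (C : Prop) [Decidable C] :
    ((PySem.List.enumerate l 0).map
        (fun p => if p.2 = '1' ∧ C ∧ p.1.toNat = t then w else 0)).sum
      = if C ∧ t < l.length ∧ l.getD t ' ' = '1' then w else 0 := by
  by_cases hC : C
  · simp only [hC, true_and]
    have := sum_ind l 0 le_rfl t w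
    simpa using this
  · simp [hC]

-- A-side: the summed contributions at cell j are the gathered window value
theorem sumContrib_eq (l : List Char) (j : Nat) (hj : j < l.length) :
    ((PySem.List.enumerate l 0).map (fun p => contrib p j)).sum = gatherVal l j := by
  have hf : (fun p : Int × Char => contrib p j)
      = (fun p : Int × Char =>
          ((((if p.2 = '1' ∧ True ∧ p.1.toNat = j + 2 then (1:Int) else 0)
            + (if p.2 = '1' ∧ True ∧ p.1.toNat = j + 1 then 2 else 0))
            + (if p.2 = '1' ∧ True ∧ p.1.toNat = j then 4 else 0))
            + (if p.2 = '1' ∧ 1 ≤ j ∧ p.1.toNat = j - 1 then 2 else 0))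
            + (if p.2 = '1' ∧ 2 ≤ j ∧ p.1.toNat = j - 2 then 1 else 0)) := by
    funext p
    by_cases hp : p.2 = '1' <;> simp [contrib, kernAt, hp]
  rw [hf, sum_map_add, sum_map_add, sum_map_add, sum_map_add,
    sum_ind', sum_ind', sum_ind', sum_ind', sum_ind']
  unfold gatherVal
  have g1 : (1 ≤ j ∧ j - 1 < l.length ∧ l.getD (j - 1) ' ' = '1')
      ↔ (1 ≤ j ∧ l.getD (j - 1) ' ' = '1') := by
    constructor
    · rintro ⟨h, _, h2⟩; exact ⟨h, h2⟩
    · rintro ⟨h, h2⟩; exact ⟨h, by omega, h2⟩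
  have g2 : (2 ≤ j ∧ j - 2 < l.length ∧ l.getD (j - 2) ' ' = '1')
      ↔ (2 ≤ j ∧ l.getD (j - 2) ' ' = '1') := by
    constructor
    · rintro ⟨h, _, h2⟩; exact ⟨h, h2⟩
    · rintro ⟨h, h2⟩; exact ⟨h, by omega, h2⟩
  have g3 : (True ∧ j < l.length ∧ l.getD j ' ' = '1') ↔ (l.getD j ' ' = '1') := by
    simp [hj]
  rw [if_congr g1 rfl rfl, if_congr g2 rfl rfl, if_congr g3 rfl rfl]
  simp only [true_and]

-- pull the accumulator out of a conditional add
theorem ite_add_out (c : Prop) [Decidable c] (t w : Int) :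
    (if c then t + w else t) = t + (if c then w else 0) := by
  split_ifs <;> ring

-- B-side: one cell of fuzzify_alt is the gathered window value
theorem alt_cell_eq (l : List Char) (j : Nat) (hj : j < l.length) :
    (fuzzKernel.foldl (fun t ow =>
        let k := (j : Int) + ow.1
        if 0 ≤ k ∧ k < (l.length : Int) ∧ l.getD k.toNat ' ' = '1' then t + ow.2 else t) 0)
      = gatherVal l j := by
  simp only [fuzzKernel, List.foldl_cons, List.foldl_nil, ite_add_out]
  have c1 : ((0:Int) ≤ (j:Int) + -2 ∧ (j:Int) + -2 < (l.length : Int)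
        ∧ l.getD ((j:Int) + -2).toNat ' ' = '1')
      ↔ (2 ≤ j ∧ l.getD (j - 2) ' ' = '1') := by
    by_cases h : 2 ≤ j
    · have e : ((j:Int) + -2).toNat = j - 2 := by omega
      rw [e]
      constructor
      · rintro ⟨_, _, hx⟩; exact ⟨h, hx⟩
      · rintro ⟨_, hx⟩; exact ⟨by omega, by omega, hx⟩
    · constructor
      · rintro ⟨hx, _, _⟩; omega
      · rintro ⟨hx, _⟩; omega
  have c2 : ((0:Int) ≤ (j:Int) + -1 ∧ (j:Int) + -1 < (l.length : Int)
        ∧ l.getD ((j:Int) + -1).toNat ' ' = '1')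
      ↔ (1 ≤ j ∧ l.getD (j - 1) ' ' = '1') := by
    by_cases h : 1 ≤ j
    · have e : ((j:Int) + -1).toNat = j - 1 := by omega
      rw [e]
      constructor
      · rintro ⟨_, _, hx⟩; exact ⟨h, hx⟩
      · rintro ⟨_, hx⟩; exact ⟨by omega, by omega, hx⟩
    · constructor
      · rintro ⟨hx, _, _⟩; omega
      · rintro ⟨hx, _⟩; omega
  have c3 : ((0:Int) ≤ (j:Int) + 0 ∧ (j:Int) + 0 < (l.length : Int)
        ∧ l.getD ((j:Int) + 0).toNat ' ' = '1')
      ↔ (l.getD j ' ' = '1') := by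
    have e : ((j:Int) + 0).toNat = j := by omega
    rw [e]
    constructor
    · rintro ⟨_, _, hx⟩; exact hx
    · intro hx; exact ⟨by omega, by omega, hx⟩
  have c4 : ((0:Int) ≤ (j:Int) + 1 ∧ (j:Int) + 1 < (l.length : Int)
        ∧ l.getD ((j:Int) + 1).toNat ' ' = '1')
      ↔ (j + 1 < l.length ∧ l.getD (j + 1) ' ' = '1') := by
    have e : ((j:Int) + 1).toNat = j + 1 := by omega
    rw [e]
    constructor
    · rintro ⟨_, hb, hx⟩; exact ⟨by omega, hx⟩
    · rintro ⟨hb, hx⟩; exact ⟨by omega, by omega, hx⟩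
  have c5 : ((0:Int) ≤ (j:Int) + 2 ∧ (j:Int) + 2 < (l.length : Int)
        ∧ l.getD ((j:Int) + 2).toNat ' ' = '1')
      ↔ (j + 2 < l.length ∧ l.getD (j + 2) ' ' = '1') := by
    have e : ((j:Int) + 2).toNat = j + 2 := by omega
    rw [e]
    constructor
    · rintro ⟨_, hb, hx⟩; exact ⟨by omega, hx⟩
    · rintro ⟨hb, hx⟩; exact ⟨by omega, by omega, hx⟩
  rw [if_congr c1 rfl rfl, if_congr c2 rfl rfl, if_congr c3 rfl rfl,
    if_congr c4 rfl rfl, if_congr c5 rfl rfl]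
  unfold gatherVal
  ring

theorem enumerate_nonneg (l : List Char) (p : Int × Char)
    (hp : p ∈ PySem.List.enumerate l 0) : 0 ≤ p.1 := by
  rw [PySem.List.mem_enumerate_iff] at hp
  obtain ⟨k, hk, rfl⟩ := hp
  simp

theorem foldl_fuzzStep_length (n : Nat) (ps : List (Int × Char)) (xs : List Int) :
    (ps.foldl (fuzzStep n) xs).length = xs.length := by
  induction ps generalizing xs with
  | nil => simp
  | cons p ps ih => rw [List.foldl_cons, ih, fuzzStep_length]

theorem fuzzify_length (s : String) : (fuzzify s).length = s.toList.length := by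
  unfold fuzzify
  rw [foldl_fuzzStep_length]
  simp

theorem fuzzify_alt_length (s : String) : (fuzzify_alt s).length = s.toList.length := by
  unfold fuzzify_alt
  simp

theorem fuzzify_cell (s : String) (j : Nat) (hj : j < s.toList.length) :
    (fuzzify s).getD j 0 = gatherVal s.toList j := by
  unfold fuzzify
  rw [fold_getD s.toList.length _ _ (by simp) (enumerate_nonneg s.toList) j hj,
    sumContrib_eq s.toList j hj]
  simp [List.getD, List.getElem?_replicate]
  split <;> rfl

theorem fuzzify_alt_cell (s : String) (j : Nat) (hj : j < s.toList.length) :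
    (fuzzify_alt s).getD j 0 = gatherVal s.toList j := by
  unfold fuzzify_alt
  rw [List.getD_eq_getElem _ _ (by simpa using hj), List.getElem_map, List.getElem_range]
  exact alt_cell_eq s.toList j hj

-- ===== VERDICT (by name: the statement is the Claim_ definition above) =====
theorem fuzzify_spec : Claim_equal_fuzzify := by
  intro s _
  unfold Spec_fuzzify
  apply List.ext_getElem
  · rw [fuzzify_length, fuzzify_alt_length]
  · intro j h1 h2
    have hj : j < s.toList.length := by rw [fuzzify_length] at h1; exact h1
    have e1 : (fuzzify s)[j] = (fuzzify s).getD j 0 := (List.getD_eq_getElem _ _ h1).symm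
    have e2 : (fuzzify_alt s)[j] = (fuzzify_alt s).getD j 0 :=
      (List.getD_eq_getElem _ _ h2).symm
    rw [e1, e2, fuzzify_cell s j hj, fuzzify_alt_cell s j hj]
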